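-- pv_equiv track=rewrite | github.com/rahulsinghal1904/cart-advisor-agent | e_commerce_agent/src/e_commerce_agent/providers/price_scraper.py | _select_best_query_for_retailer
-- ===== SOURCE A (Python) =====
-- from typing import Dict, List, Optional, Any, Tuple, BinaryIO
--
-- def _select_best_query_for_retailer(retailer: str, search_queries: Dict[str, List[str]]) -> str:
--     """Select the best query for a given retailer based on known search capabilities."""
--     # Different retailers have different search algorithms
--     if retailer == "amazon":
--         # Amazon handles complex queries well
--         for strategy in ['brand_product', 'specifications', 'keywords']:
--             if search_queries.get(strategy) and len(search_queries[strategy]) > 0: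
--                 return search_queries[strategy][0]
--
--     elif retailer == "walmart":
--         # Walmart does better with simpler queries
--         for strategy in ['brand_product', 'keywords', 'category']:
--             if search_queries.get(strategy) and len(search_queries[strategy]) > 0:
--                 return search_queries[strategy][0]
--
--     elif retailer == "target":
--         # Target does better with brand + product type
--         if search_queries.get('brand_product') and len(search_queries['brand_product']) > 0:
--             return search_queries['brand_product'][0]
--         # Fallback to keywords
--         elif search_queries.get('keywords') and len(search_queries['keywords']) > 0:
--             return search_queries['keywords'][0]
--
--     elif retailer == "bestbuy":
--         # Best Buy does well with specifications for electronics
--         if search_queries.get('specifications') and len(search_queries['specifications']) > 0: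
--             return search_queries['specifications'][0]
--         # Fallback to brand + product
--         elif search_queries.get('brand_product') and len(search_queries['brand_product']) > 0:
--             return search_queries['brand_product'][0]
--
--     # Default to first keyword query as fallback
--     if search_queries.get('keywords') and len(search_queries['keywords']) > 0:
--         return search_queries['keywords'][0]
--
--     # Ultimate fallback - use first query from first non-empty strategy
--     for strategy, queries in search_queries.items():
--         if queries:
--             return queries[0]
--
--     # If everything fails, return a simple query based on product type
--     return "product"  # Should never happen with proper analysis
-- ===== SOURCE B (Python) =====
-- _PREFS = {
--     "amazon": ("brand_product", "specifications", "keywords"),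
--     "walmart": ("brand_product", "keywords", "category"),
--     "target": ("brand_product", "keywords"),
--     "bestbuy": ("specifications", "brand_product"),
-- }
--
-- def _select_best_query_for_retailer(retailer, search_queries):
--     """Single pass over the dict items: keep the non-empty entry with the best
--     (lowest) preference rank for this retailer; unranked entries share the worst
--     rank, so the first of them wins only when nothing ranked is available."""
--     prefs = _PREFS.get(retailer, ()) + ("keywords",)
--     best_rank = len(prefs) + 1
--     best = "product"
--     for strategy, queries in search_queries.items():
--         if not queries:
--             continue
--         try:
--             rank = prefs.index(strategy)
--         except ValueError:
--             rank = len(prefs)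
--         if rank < best_rank:
--             best_rank, best = rank, queries[0]
--     return best
-- ===== Notes on version B (the rewrite author's own statement) =====
-- stated objective: alternative
-- what changed: A probes the dict strategy-by-strategy through per-retailer branch chains plus staged fallbacks; B makes one pass over the dict items keeping the non-empty entry of minimal preference rank (unranked entries share the worst rank, first occurrence wins). Pre_ excludes association lists with duplicate keys, which cannot arise from a Python dict and on which first-match lookup order is accidental.
import Mathlib
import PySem

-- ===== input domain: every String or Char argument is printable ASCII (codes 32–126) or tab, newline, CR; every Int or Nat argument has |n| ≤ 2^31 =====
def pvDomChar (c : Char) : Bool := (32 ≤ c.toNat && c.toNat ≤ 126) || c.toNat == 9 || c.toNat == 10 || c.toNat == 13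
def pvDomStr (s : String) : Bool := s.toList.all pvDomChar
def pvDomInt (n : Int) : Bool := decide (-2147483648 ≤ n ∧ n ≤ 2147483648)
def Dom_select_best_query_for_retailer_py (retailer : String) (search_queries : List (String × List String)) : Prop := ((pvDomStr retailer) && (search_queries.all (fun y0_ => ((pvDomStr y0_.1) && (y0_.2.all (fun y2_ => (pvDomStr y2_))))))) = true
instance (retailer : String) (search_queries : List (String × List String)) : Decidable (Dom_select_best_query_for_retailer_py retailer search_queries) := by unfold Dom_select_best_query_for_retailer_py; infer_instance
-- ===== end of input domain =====

-- B replaces A's strategy-by-strategy dict probes (per-retailer branch chains plus staged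
-- fallbacks) by a single pass over the dict items keeping the non-empty entry of minimal
-- preference rank; objective: alternative. Return-value equivalence only (no mutation).

-- ===== PORT A =====
-- the 'for strategy in [...]' loop of the amazon/walmart branches: get(strategy) truthy and non-empty → return first element
def pvTryStrategies (search_queries : List (String × List String)) : List String → Option String
  | [] => none
  | s :: rest =>
    match PySem.Dict.get? (PySem.Dict.mk search_queries) s with
    | some (q :: _) => some q
    | _ => pvTryStrategies search_queries rest

-- the final 'for strategy, queries in search_queries.items()' fallback loop
def pvFinalFallback : List (String × List String) → String
  | [] => "product"
  | (_, q :: _) :: _ => q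
  | (_, []) :: rest => pvFinalFallback rest

def select_best_query_for_retailer_py (retailer : String) (search_queries : List (String × List String)) : String :=
  let branch : Option String :=
    if retailer == "amazon" then
      pvTryStrategies search_queries ["brand_product", "specifications", "keywords"]
    else if retailer == "walmart" then
      pvTryStrategies search_queries ["brand_product", "keywords", "category"]
    else if retailer == "target" then
      match PySem.Dict.get? (PySem.Dict.mk search_queries) "brand_product" with
      | some (q :: _) => some q
      | _ =>
        match PySem.Dict.get? (PySem.Dict.mk search_queries) "keywords" with
        | some (q :: _) => some q
        | _ => none
    else if retailer == "bestbuy" then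
      match PySem.Dict.get? (PySem.Dict.mk search_queries) "specifications" with
      | some (q :: _) => some q
      | _ =>
        match PySem.Dict.get? (PySem.Dict.mk search_queries) "brand_product" with
        | some (q :: _) => some q
        | _ => none
    else none
  match branch with
  | some q => q
  | none =>
    match PySem.Dict.get? (PySem.Dict.mk search_queries) "keywords" with
    | some (q :: _) => q
    | _ => pvFinalFallback search_queries

-- ===== PORT B =====
def pvPrefTable : PySem.Dict String (List String) :=
  PySem.Dict.mk
    [ ("amazon", ["brand_product", "specifications", "keywords"])
    , ("walmart", ["brand_product", "keywords", "category"])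
    , ("target", ["brand_product", "keywords"])
    , ("bestbuy", ["specifications", "brand_product"]) ]

def pvPrefs (retailer : String) : List String :=
  PySem.Dict.getD pvPrefTable retailer [] ++ ["keywords"]

-- one iteration of B's loop: skip empty lists, else update the minimal-rank accumulator
def pvStep (prefs : List String) (acc : Nat × String) (p : String × List String) : Nat × String :=
  match p.2 with
  | [] => acc
  | q :: _ =>
    let rank := (PySem.List.index? prefs p.1).getD prefs.length
    if rank < acc.1 then (rank, q) else acc

def select_best_query_for_retailer_py_alt (retailer : String) (search_queries : List (String × List String)) : String :=
  let prefs := pvPrefs retailer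
  (search_queries.foldl (pvStep prefs) (prefs.length + 1, "product")).2

-- ===== PRECONDITION & SPEC =====
-- Pre_ excludes association lists with duplicate keys: they cannot arise from a Python dict,
-- and on them A's first-match lookup vs B's scan order is accidental.
def Pre_select_best_query_for_retailer_py (retailer : String) (search_queries : List (String × List String)) : Prop :=
  (search_queries.map Prod.fst).Nodup
instance (retailer : String) (search_queries : List (String × List String)) : Decidable (Pre_select_best_query_for_retailer_py retailer search_queries) := by unfold Pre_select_best_query_for_retailer_py; infer_instance

def pvWitness_select_best_query_for_retailer_py : String × (List (String × List String)) :=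
  ("walmart", [("brand_product", []), ("keywords", ["usb cable"])])

def Spec_select_best_query_for_retailer_py (retailer : String) (search_queries : List (String × List String)) (out : String) : Prop := out = select_best_query_for_retailer_py_alt retailer search_queries
instance (retailer : String) (search_queries : List (String × List String)) (out : String) : Decidable (Spec_select_best_query_for_retailer_py retailer search_queries out) := by unfold Spec_select_best_query_for_retailer_py; infer_instance

-- ===== CLAIM (what is proved, stated in full; the proofs are below) =====
def Claim_equal_select_best_query_for_retailer_py : Prop := ∀ (retailer : String) (search_queries : List (String × List String)), Dom_select_best_query_for_retailer_py retailer search_queries → Pre_select_best_query_for_retailer_py retailer search_queries → Spec_select_best_query_for_retailer_py retailer search_queries (select_best_query_for_retailer_py retailer search_queries)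

-- ===== LEMMAS AND PROOFS =====

-- A's per-strategy probe: first value at key s when that value is non-empty
def pvProbe (search_queries : List (String × List String)) (s : String) : Option String :=
  match PySem.Dict.get? (PySem.Dict.mk search_queries) s with
  | some (q :: _) => some q
  | _ => none

theorem pvProbe_cons (s s' : String) (qs : List String) (t : List (String × List String)) :
    pvProbe ((s, qs) :: t) s' = if s = s' then qs.head? else pvProbe t s' := by
  simp only [pvProbe, PySem.Dict.get?_mk_cons, beq_iff_eq]
  split_ifs with h <;> cases qs <;> rfl

theorem pvProbe_not_key (s : String) (t : List (String × List String))
    (h : s ∉ t.map Prod.fst) : pvProbe t s = none := by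
  induction t with
  | nil => rfl
  | cons p rest ih =>
    obtain ⟨k, qs⟩ := p
    simp only [List.map_cons, List.mem_cons] at h
    push_neg at h
    rw [show ((k, qs) :: rest : List (String × List String)) = (k, qs) :: rest from rfl,
      pvProbe_cons, if_neg (by exact fun he => h.1 he.symm)]
    exact ih h.2

theorem pvFindSome_congr {α β : Type} (f g : α → Option β) :
    ∀ l : List α, (∀ x ∈ l, f x = g x) → l.findSome? f = l.findSome? g
  | [], _ => rfl
  | x :: l, h => by
    simp only [List.findSome?, h x (List.mem_cons_self)]
    cases g x with
    | some b => rfl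
    | none => exact pvFindSome_congr f g l (fun y hy => h y (List.mem_cons_of_mem _ hy))

theorem pvTry_eq_findSome (sq : List (String × List String)) :
    ∀ ss : List String, pvTryStrategies sq ss = ss.findSome? (pvProbe sq)
  | [] => rfl
  | s :: rest => by
    simp only [pvTryStrategies, List.findSome?, pvProbe]
    cases h : PySem.Dict.get? (PySem.Dict.mk sq) s with
    | none => simpa using pvTry_eq_findSome sq rest
    | some l => cases l <;> simp [pvTry_eq_findSome sq rest]

theorem pvFallback_eq (sq : List (String × List String)) :
    pvFinalFallback sq = (sq.findSome? (fun p => p.2.head?)).getD "product" := by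
  induction sq with
  | nil => rfl
  | cons p rest ih =>
    obtain ⟨s, qs⟩ := p
    cases qs <;> simp [pvFinalFallback, List.findSome?, ih]

-- A's whole tail after the branch, in findSome? form
theorem pvCombine (sq : List (String × List String)) (ss : List String) :
    (match pvTryStrategies sq ss with
     | some q => q
     | none =>
       match PySem.Dict.get? (PySem.Dict.mk sq) "keywords" with
       | some (q :: _) => q
       | _ => pvFinalFallback sq)
    = (match (ss ++ ["keywords"]).findSome? (pvProbe sq) with
       | some q => q
       | none =>
         match sq.findSome? (fun p => p.2.head?) with
         | some q => q
         | none => "product") := by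
  rw [List.findSome?_append, pvTry_eq_findSome]
  cases ss.findSome? (pvProbe sq) with
  | some q => rfl
  | none =>
    simp only [Option.or, List.findSome?, pvProbe, pvFallback_eq]
    cases h : PySem.Dict.get? (PySem.Dict.mk sq) "keywords" with
    | none => cases sq.findSome? (fun p => p.2.head?) <;> simp
    | some l => cases l <;> cases sq.findSome? (fun p => p.2.head?) <;> simp

-- a member of the first r elements has first index below r
theorem pvIndex_lt_of_mem_take {α : Type} [BEq α] [LawfulBEq α] :
    ∀ (l : List α) (r : Nat) (x : α), x ∈ l.take r →
      ∃ ρ, PySem.List.index? l x = some ρ ∧ ρ < r := by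
  intro l
  induction l with
  | nil => intro r x hx; simp at hx
  | cons a l ih =>
    intro r x hx
    cases r with
    | zero => simp at hx
    | succ r =>
      rw [List.take_succ_cons, List.mem_cons] at hx
      by_cases hax : a = x
      · subst hax
        exact ⟨0, PySem.List.index?_cons_self a l, Nat.succ_pos r⟩
      · obtain ⟨ρ, hρ, hlt⟩ := ih r x (hx.resolve_left (fun h => hax h.symm))
        exact ⟨ρ + 1, by rw [PySem.List.index?_cons_of_ne l hax, hρ]; rfl, by omega⟩

-- what B's fold computes from accumulator (r, b): the first probe hit among the first r
-- preferred strategies, else (only from the initial accumulator r = n+1) the first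
-- non-empty entry, else b
def pvSpecRes (prefs : List String) (sq : List (String × List String)) (r : Nat) (b : String) : String :=
  match (prefs.take r).findSome? (pvProbe sq) with
  | some q => q
  | none =>
    if r = prefs.length + 1 then (sq.findSome? (fun p => p.2.head?)).getD b else b

theorem pvFold_eq_specRes (prefs : List String) :
    ∀ (sq : List (String × List String)), (sq.map Prod.fst).Nodup →
      ∀ (r : Nat) (b : String), r ≤ prefs.length + 1 →
        (sq.foldl (pvStep prefs) (r, b)).2 = pvSpecRes prefs sq r b := by
  intro sq
  induction sq with
  | nil =>
    intro _ r b hr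
    have hnone : ∀ (l : List String), l.findSome? (pvProbe ([] : List (String × List String))) = none := by
      intro l
      induction l with
      | nil => rfl
      | cons x l ih =>
        simp only [List.findSome?, show pvProbe ([] : List (String × List String)) x = none from rfl]
        exact ih
    simp only [List.foldl_nil, pvSpecRes, hnone, List.findSome?_nil]
    split_ifs <;> rfl
  | cons p t ih =>
    intro hnd r b hr
    obtain ⟨s, qs⟩ := p
    simp only [List.map_cons, List.nodup_cons] at hnd
    obtain ⟨hs, hnd'⟩ := hnd
    have hps : pvProbe t s = none := pvProbe_not_key s t hs
    have hcongr : ∀ (l : List String), s ∉ l →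
        l.findSome? (pvProbe ((s, qs) :: t)) = l.findSome? (pvProbe t) := by
      intro l hl
      refine pvFindSome_congr _ _ l (fun x hx => ?_)
      rw [pvProbe_cons, if_neg (fun he => hl (by rw [he]; exact hx))]
    cases qs with
    | nil =>
      -- empty value: the fold skips it and the probes/fallback ignore it
      have hsame : ∀ (l : List String),
          l.findSome? (pvProbe ((s, ([] : List String)) :: t)) = l.findSome? (pvProbe t) := by
        intro l
        refine pvFindSome_congr _ _ l (fun x _ => ?_)
        rw [pvProbe_cons]
        split_ifs with h
        · subst h; exact hps.symm
        · rfl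
      simp only [List.foldl_cons, pvStep]
      rw [ih hnd' r b hr]
      simp [pvSpecRes, hsame, List.findSome?]
    | cons q rest =>
      have hrank : (PySem.List.index? prefs s).getD prefs.length ≤ prefs.length := by
        cases h : PySem.List.index? prefs s with
        | none => simp
        | some k =>
          obtain ⟨hk, -, -⟩ := PySem.List.getElem_of_index?_eq_some h
          simpa using Nat.le_of_lt hk
      simp only [List.foldl_cons, pvStep]
      by_cases hlt : (PySem.List.index? prefs s).getD prefs.length < r
      · rw [if_pos hlt, ih hnd' _ _ (by omega)]
        -- the new accumulator rank is the rank of s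
        cases hidx : PySem.List.index? prefs s with
        | some ρ =>
          -- s occurs in prefs at first position ρ < r
          rw [hidx] at hlt
          simp only [Option.getD_some] at hlt ⊢
          obtain ⟨pre, suf, hsplit, hlen, hpre⟩ := (PySem.List.index?_eq_some_iff _ _ _).mp hidx
          have hρn : ρ < prefs.length := by
            obtain ⟨hk, -, -⟩ := PySem.List.getElem_of_index?_eq_some hidx; exact hk
          have htakeρ : prefs.take ρ = pre := by
            rw [hsplit, ← hlen, List.take_left]
          have htaker : prefs.take r = pre ++ s :: (suf.take (r - ρ - 1)) := by
            have h2 : pre.take r = pre := List.take_of_length_le (by omega)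
            have h3 : (s :: suf).take (r - pre.length) = s :: suf.take (r - ρ - 1) := by
              obtain ⟨m, hm⟩ : ∃ m, r - pre.length = m + 1 := ⟨r - ρ - 1, by omega⟩
              have hmm : m = r - ρ - 1 := by omega
              rw [hm, List.take_succ_cons, hmm]
            rw [hsplit, List.take_append, h2, h3]
          unfold pvSpecRes
          rw [htaker, htakeρ, List.findSome?_append,
            hcongr pre (fun hmem => hpre hmem)]
          cases pre.findSome? (pvProbe t) with
          | some x => rfl
          | none =>
            rw [if_neg (by omega)]
            simp [List.findSome?, pvProbe_cons]
        | none =>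
          -- s unranked: rank = prefs.length, so r = prefs.length + 1 (initial accumulator)
          rw [hidx] at hlt
          simp only [Option.getD_none] at hlt ⊢
          have hr' : r = prefs.length + 1 := by omega
          have hsnot : s ∉ prefs := (PySem.List.index?_eq_none_iff _ _).mp hidx
          unfold pvSpecRes
          rw [hr', List.take_of_length_le (by omega), List.take_of_length_le (by omega),
            hcongr prefs hsnot]
          cases prefs.findSome? (pvProbe t) with
          | some x => rfl
          | none => simp
      · rw [if_neg hlt, ih hnd' r b hr]
        -- s's rank is not better: every strategy among the first r is ≠ s
        have hne : ∀ x ∈ prefs.take r, x ≠ s := by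
          intro x hx he
          subst he
          obtain ⟨ρ, hρeq, hρlt⟩ := pvIndex_lt_of_mem_take prefs r x hx
          rw [hρeq] at hlt
          simp only [Option.getD_some] at hlt
          exact hlt hρlt
        unfold pvSpecRes
        rw [hcongr (prefs.take r) (fun hmem => hne s hmem rfl)]
        have hrne : r ≠ prefs.length + 1 := by
          intro he; rw [he] at hlt; omega
        simp [hrne]

-- B from accumulator (n+1, "product") in the same findSome? form as A's tail
theorem pvAlt_eq (retailer : String) (sq : List (String × List String))
    (hnd : (sq.map Prod.fst).Nodup) :
    select_best_query_for_retailer_py_alt retailer sq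
    = (match (pvPrefs retailer).findSome? (pvProbe sq) with
       | some q => q
       | none =>
         match sq.findSome? (fun p => p.2.head?) with
         | some q => q
         | none => "product") := by
  unfold select_best_query_for_retailer_py_alt
  rw [pvFold_eq_specRes (pvPrefs retailer) sq hnd _ _ (le_refl _)]
  unfold pvSpecRes
  rw [List.take_of_length_le (by omega), if_pos rfl]
  cases (pvPrefs retailer).findSome? (pvProbe sq) with
  | some q => rfl
  | none => cases sq.findSome? (fun p => p.2.head?) <;> rfl

-- ===== VERDICT (by name: the statement is the Claim_ definition above) =====
theorem select_best_query_for_retailer_py_spec : Claim_equal_select_best_query_for_retailer_py := by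
  intro retailer sq _ hnd
  unfold Spec_select_best_query_for_retailer_py select_best_query_for_retailer_py
  rw [pvAlt_eq retailer sq hnd]
  by_cases h1 : retailer = "amazon"
  · subst h1; exact pvCombine sq ["brand_product", "specifications", "keywords"]
  by_cases h2 : retailer = "walmart"
  · subst h2; exact pvCombine sq ["brand_product", "keywords", "category"]
  by_cases h3 : retailer = "target"
  · subst h3; exact pvCombine sq ["brand_product", "keywords"]
  by_cases h4 : retailer = "bestbuy"
  · subst h4; exact pvCombine sq ["specifications", "brand_product"]
  · have hg : pvPrefs retailer = ["keywords"] := by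
      simp [pvPrefs, pvPrefTable, PySem.Dict.getD, PySem.Dict.get?,
        Ne.symm h1, Ne.symm h2, Ne.symm h3, Ne.symm h4]
    simp only [beq_iff_eq, h1, h2, h3, h4, if_false, hg]
    exact pvCombine sq []
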